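-- pv_equiv track=rewrite | github.com/8Bit1Byte/CodechefSolutions | START4 Competition/CORTSENT.py | checkLanguage
-- ===== SOURCE A (Python) =====
-- def checkLanguage(item):
--     items = list(item)
--     if all([ord(i) <= 109 and ord(i) >= 97 for i in items]):
--         return 'lang_1'
--     elif all([ord(i) <= 90 and ord(i) >= 78 for i in items]):
--         return 'lang_2'
--     else:
--         return 'lang_none'
-- ===== SOURCE B (Python) =====
-- def checkLanguage(item):
--     if not item:
--         return 'lang_1'
--     lo, hi = min(item), max(item)
--     if 'a' <= lo and hi <= 'm':
--         return 'lang_1'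
--     if 'N' <= lo and hi <= 'Z':
--         return 'lang_2'
--     return 'lang_none'
-- ===== Notes on version B (the rewrite author's own statement) =====
-- stated objective: simpler
-- what changed: Replaces the two full all()-predicate scans over the characters with a single reduction to the min and max character, classifying purely from those two extremes (with an explicit empty-string guard).
import Mathlib
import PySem

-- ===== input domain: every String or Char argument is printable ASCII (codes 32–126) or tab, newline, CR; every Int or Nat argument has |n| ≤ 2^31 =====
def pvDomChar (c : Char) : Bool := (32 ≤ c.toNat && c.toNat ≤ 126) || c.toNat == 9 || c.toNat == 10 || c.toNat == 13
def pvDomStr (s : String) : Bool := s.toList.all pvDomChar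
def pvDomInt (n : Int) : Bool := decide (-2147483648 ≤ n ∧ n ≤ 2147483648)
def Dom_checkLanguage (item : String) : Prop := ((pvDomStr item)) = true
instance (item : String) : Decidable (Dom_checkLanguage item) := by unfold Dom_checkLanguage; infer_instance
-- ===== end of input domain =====

-- B replaces the two full all()-predicate scans with one reduction to the min/max character; objective: simpler.


-- ===== PORT A =====
def checkLanguage (item : String) : String :=
  let items := item.toList
  if items.all (fun i => decide (i.toNat ≤ 109) && decide (97 ≤ i.toNat)) then "lang_1"
  else if items.all (fun i => decide (i.toNat ≤ 90) && decide (78 ≤ i.toNat)) then "lang_2"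
  else "lang_none"

-- ===== PORT B =====
def checkLanguage_alt (item : String) : String :=
  match item.toList with
  | [] => "lang_1"
  | h :: t =>
    let lo := t.foldl min h
    let hi := t.foldl max h
    if 'a' ≤ lo && hi ≤ 'm' then "lang_1"
    else if 'N' ≤ lo && hi ≤ 'Z' then "lang_2"
    else "lang_none"

-- ===== PRECONDITION & SPEC =====
def Spec_checkLanguage (item : String) (out : String) : Prop := out = checkLanguage_alt item
instance (item : String) (out : String) : Decidable (Spec_checkLanguage item out) := by unfold Spec_checkLanguage; infer_instance

-- ===== CLAIM (what is proved, stated in full; the proofs are below) =====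
def Claim_equal_checkLanguage : Prop := ∀ (item : String), Dom_checkLanguage item → Spec_checkLanguage item (checkLanguage item)

-- ===== LEMMAS AND PROOFS =====

theorem char_le_iff (a b : Char) : a ≤ b ↔ a.toNat ≤ b.toNat := by
  rw [Char.le_def, UInt32.le_iff_toNat_le]
  exact Iff.rfl

theorem char_toNat_min (a b : Char) : (Min.min a b).toNat = Min.min a.toNat b.toNat := by
  rcases le_total a b with hle | hle
  · rw [min_eq_left hle, min_eq_left ((char_le_iff a b).mp hle)]
  · rw [min_eq_right hle, min_eq_right ((char_le_iff b a).mp hle)]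

theorem char_toNat_max (a b : Char) : (Max.max a b).toNat = Max.max a.toNat b.toNat := by
  rcases le_total a b with hle | hle
  · rw [max_eq_right hle, max_eq_right ((char_le_iff a b).mp hle)]
  · rw [max_eq_left hle, max_eq_left ((char_le_iff b a).mp hle)]

theorem le_foldl_min (a : Nat) (h : Char) (t : List Char) :
    (a ≤ (t.foldl min h).toNat) ↔ a ≤ h.toNat ∧ ∀ c ∈ t, a ≤ c.toNat := by
  induction t generalizing h with
  | nil => simp
  | cons c t ih =>
    simp only [List.foldl_cons, ih, char_toNat_min, le_min_iff, List.mem_cons]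
    constructor
    · rintro ⟨⟨h1, h2⟩, h3⟩
      exact ⟨h1, fun d hd => hd.elim (fun e => e ▸ h2) (h3 d)⟩
    · rintro ⟨h1, h2⟩
      exact ⟨⟨h1, h2 c (Or.inl rfl)⟩, fun d hd => h2 d (Or.inr hd)⟩

theorem foldl_max_le (a : Nat) (h : Char) (t : List Char) :
    ((t.foldl max h).toNat ≤ a) ↔ h.toNat ≤ a ∧ ∀ c ∈ t, c.toNat ≤ a := by
  induction t generalizing h with
  | nil => simp
  | cons c t ih =>
    simp only [List.foldl_cons, ih, char_toNat_max, max_le_iff, List.mem_cons]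
    constructor
    · rintro ⟨⟨h1, h2⟩, h3⟩
      exact ⟨h1, fun d hd => hd.elim (fun e => e ▸ h2) (h3 d)⟩
    · rintro ⟨h1, h2⟩
      exact ⟨⟨h1, h2 c (Or.inl rfl)⟩, fun d hd => h2 d (Or.inr hd)⟩

-- ===== VERDICT (by name: the statement is the Claim_ definition above) =====
theorem checkLanguage_spec : Claim_equal_checkLanguage := by
  intro item _
  unfold Spec_checkLanguage checkLanguage checkLanguage_alt
  cases hcs : item.toList with
  | nil => simp
  | cons h t =>
    have hA1 : ((h.toNat ≤ 109 ∧ 97 ≤ h.toNat) ∧ ∀ x ∈ t, x.toNat ≤ 109 ∧ 97 ≤ x.toNat) ↔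
        (97 ≤ (t.foldl min h).toNat ∧ (t.foldl max h).toNat ≤ 109) := by
      rw [le_foldl_min, foldl_max_le]
      constructor
      · rintro ⟨⟨h1, h2⟩, h3⟩
        exact ⟨⟨h2, fun c hc => (h3 c hc).2⟩, h1, fun c hc => (h3 c hc).1⟩
      · rintro ⟨⟨h1, h2⟩, h3, h4⟩
        exact ⟨⟨h3, h1⟩, fun c hc => ⟨h4 c hc, h2 c hc⟩⟩
    have hA2 : ((h.toNat ≤ 90 ∧ 78 ≤ h.toNat) ∧ ∀ x ∈ t, x.toNat ≤ 90 ∧ 78 ≤ x.toNat) ↔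
        (78 ≤ (t.foldl min h).toNat ∧ (t.foldl max h).toNat ≤ 90) := by
      rw [le_foldl_min, foldl_max_le]
      constructor
      · rintro ⟨⟨h1, h2⟩, h3⟩
        exact ⟨⟨h2, fun c hc => (h3 c hc).2⟩, h1, fun c hc => (h3 c hc).1⟩
      · rintro ⟨⟨h1, h2⟩, h3, h4⟩
        exact ⟨⟨h3, h1⟩, fun c hc => ⟨h4 c hc, h2 c hc⟩⟩
    simp only [List.all_cons, List.all_eq_true, Bool.and_eq_true, decide_eq_true_eq,
      char_le_iff, Char.reduceToNat, hA1, hA2]
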